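-- pv_equiv track=rewrite | github.com/Darkhunter9/python | String Conversion.py | steps_to_convert
-- ===== SOURCE A (Python) =====
-- def steps_to_convert(line1,line2):
--     def compare(line1,line2,i):
--         tempdict = {}
--         for j in range(len(line1)):
--             if line1[j] in line2:
--                 try:
--                     tempdict[i+j] = line2.index(line1[j],max(tempdict.values()) if tempdict else 0)
--                 except Exception:
--                     continue
--         return tempdict
--
--     def calculate(line1,line2,similardict):
--         result = 0
--         temp3 = -1
--         temp4 = -1
--         while similardict:
--             result += max(min(similardict.keys())-1-temp3,similardict[min(similardict.keys())]-temp4-1)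
--             temp3 = min(similardict.keys())
--             temp4 = similardict[min(similardict.keys())]
--             similardict.pop(min(similardict.keys()))
--         result += max(len(line1)-temp3-1,len(line2)-temp4-1)
--         return result
--
--     result = None
--     for i in range(len(line1)):
--         tempdict = {}
--         tempdict = compare(line1[i:],line2,i)
--         if result == None:
--             result = calculate(line1,line2,tempdict)
--         else:
--             result = min(result,calculate(line1,line2,tempdict))
--     for i in range(len(line2)):
--         tempdict = {}
--         tempdict = compare(line2[i:],line1,i)
--         if result == None:
--             result = calculate(line2,line1,tempdict)
--         else:
--             result = min(result,calculate(line2,line1,tempdict))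
--
--     if result == None:
--         return 0
--     else:
--         return result
-- ===== SOURCE B (Python) =====
-- def steps_to_convert(line1, line2):
--     # B: subsequence-automaton — a next-occurrence table built by one backward
--     # sweep gives each greedy match in O(1), and all candidate costs are emitted
--     # by a generator and reduced by a single min(..., default=0).
--     def costs(a, b):
--         # nxt[p][c] = smallest index q >= p with b[q] == c (backward sweep)
--         nxt = [{}]
--         for p in range(len(b) - 1, -1, -1):
--             d = dict(nxt[-1])
--             d[b[p]] = p
--             nxt.append(d)
--         nxt.reverse()
--         for i in range(len(a)):
--             cur, r, pk, pv = 0, 0, -1, -1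
--             for j, c in enumerate(a[i:], i):
--                 q = nxt[cur].get(c)
--                 if q is not None:
--                     r += max(j - 1 - pk, q - pv - 1)
--                     cur, pk, pv = q, j, q
--             yield r + max(len(a) - pk - 1, len(b) - pv - 1)
--     return min([*costs(line1, line2), *costs(line2, line1)], default=0)
-- ===== Notes on version B (the rewrite author's own statement) =====
-- stated objective: faster
-- what changed: B builds a next-occurrence subsequence automaton (nxt[p][c] = first index >= p of c) by one backward sweep so every greedy match is a single O(1) dict lookup instead of A's linear str.index scan plus max() over all dict values, and it emits all candidate costs from a fused generator pass reduced by one min(..., default=0) instead of A's dict that is afterwards replayed by a quadratic pop-min loop.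
import Mathlib
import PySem

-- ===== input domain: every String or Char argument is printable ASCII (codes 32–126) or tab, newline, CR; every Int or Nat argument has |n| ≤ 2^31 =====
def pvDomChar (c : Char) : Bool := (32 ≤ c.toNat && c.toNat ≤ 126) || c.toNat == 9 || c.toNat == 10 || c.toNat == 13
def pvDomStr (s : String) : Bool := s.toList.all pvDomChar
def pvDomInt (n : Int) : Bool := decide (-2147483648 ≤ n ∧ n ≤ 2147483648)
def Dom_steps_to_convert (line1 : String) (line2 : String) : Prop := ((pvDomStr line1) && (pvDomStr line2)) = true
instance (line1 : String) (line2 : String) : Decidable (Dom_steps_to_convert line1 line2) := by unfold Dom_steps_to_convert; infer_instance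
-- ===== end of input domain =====

-- B replaces A's repeated linear index scans and dict-min popping with a
-- next-occurrence subsequence automaton built by one backward sweep (O(1) match
-- transitions) and a single min over all emitted candidate costs (faster).


-- ===== PORT A =====
-- compare(line1, line2, i): greedy dict {i+j ↦ line2.index(line1[j], max(values) or 0)}
def pvCompare (l1 l2 : List Char) (i : Int) : PySem.Dict Int Int :=
  (PySem.List.pyRange 0 (l1.length : Int) 1).foldl (fun td j =>
    let c := PySem.List.pyGetD l1 j ' '
    if PySem.Chars.isIn [c] l2 then
      let start : Int := if td.items.isEmpty then 0 else (PySem.List.max? td.values (fun v => v)).getD 0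
      let f := PySem.Chars.findFrom l2 [c] start
      if f = -1 then td else td.insert (i + j) f
    else td) PySem.Dict.empty

-- the while-loop of calculate; fuel = dict size (each round pops the min key)
def pvCalcLoop : Nat → PySem.Dict Int Int → Int → Int → Int → Int × Int × Int
  | 0, _, r, t3, t4 => (r, t3, t4)
  | fuel+1, d, r, t3, t4 =>
    match PySem.List.min? d.keys (fun k => k) with
    | none => (r, t3, t4)
    | some mk =>
      let v := d.getD mk 0
      pvCalcLoop fuel (d.erase mk) (r + max (mk - 1 - t3) (v - t4 - 1)) mk v

def pvCalculate (l1 l2 : List Char) (d : PySem.Dict Int Int) : Int :=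
  let s := pvCalcLoop d.size d 0 (-1) (-1)
  s.1 + max ((l1.length : Int) - s.2.1 - 1) ((l2.length : Int) - s.2.2 - 1)

-- one of A's two symmetric outer loops
def pvLoopA (l1 l2 : List Char) (init : Option Int) : Option Int :=
  (PySem.List.pyRange 0 (l1.length : Int) 1).foldl (fun res i =>
    let td := pvCompare (PySem.List.slice l1 (some i) none) l2 i
    match res with
    | none => some (pvCalculate l1 l2 td)
    | some r => some (min r (pvCalculate l1 l2 td))) init

def steps_to_convert (line1 : String) (line2 : String) : Int :=
  match pvLoopA line2.toList line1.toList (pvLoopA line1.toList line2.toList none) with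
  | none => 0
  | some v => v

-- ===== PORT B =====
-- one construction step of the next-occurrence table (Source B builds it by a
-- descending-index append loop and a final reverse; foldr over enumerate
-- performs exactly the same insertions in the same order)
def pvNxtStep (p : Int × Char) (acc : List (PySem.Dict Char Int)) : List (PySem.Dict Char Int) :=
  (match acc with | [] => PySem.Dict.empty | d :: _ => d.insert p.2 p.1) :: acc

-- nxt table: nxt[p] maps c to the smallest index q ≥ p of b with b[q] = c
def pvNxtTable (b : List Char) : List (PySem.Dict Char Int) :=
  (PySem.List.enumerate b 0).foldr pvNxtStep [PySem.Dict.empty]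

-- one step of the fused greedy pass; state = (cur, r, pk, pv); nxt[cur].get(c)
def pvBStep (tbl : List (PySem.Dict Char Int)) (st : Int × Int × Int × Int) (p : Int × Char) :
    Int × Int × Int × Int :=
  match (PySem.List.pyGetD tbl st.1 PySem.Dict.empty).get? p.2 with
  | none => st
  | some q => (q, st.2.1 + max (p.1 - 1 - st.2.2.1) (q - st.2.2.2 - 1), p.1, q)

-- one yielded candidate cost (the pass for start index i)
def pvPass (tbl : List (PySem.Dict Char Int)) (alen blen : Int) (a : List Char) (i : Int) : Int :=
  let st := (PySem.List.enumerate (PySem.List.slice a (some i) none) i).foldl (pvBStep tbl)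
    (0, 0, -1, -1)
  st.2.1 + max (alen - st.2.2.1 - 1) (blen - st.2.2.2 - 1)

-- the generator costs(a, b) as the list of its yields
def pvCosts (a b : List Char) : List Int :=
  let tbl := pvNxtTable b
  (PySem.List.pyRange 0 (a.length : Int) 1).map (pvPass tbl (a.length : Int) (b.length : Int) a)

def steps_to_convert_alt (line1 : String) (line2 : String) : Int :=
  match PySem.List.min? (pvCosts line1.toList line2.toList ++ pvCosts line2.toList line1.toList)
      (fun x => x) with
  | none => 0
  | some v => v

-- ===== PRECONDITION & SPEC =====
def Spec_steps_to_convert (line1 : String) (line2 : String) (out : Int) : Prop := out = steps_to_convert_alt line1 line2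
instance (line1 : String) (line2 : String) (out : Int) : Decidable (Spec_steps_to_convert line1 line2 out) := by unfold Spec_steps_to_convert; infer_instance

-- ===== CLAIM (what is proved, stated in full; the proofs are below) =====
def Claim_equal_steps_to_convert : Prop := ∀ (line1 : String) (line2 : String), Dom_steps_to_convert line1 line2 → Spec_steps_to_convert line1 line2 (steps_to_convert line1 line2)

-- ===== LEMMAS AND PROOFS =====

-- occurrence indices of c in b, increasing (the proofs' common vocabulary)
def pvOcc (b : List Char) (c : Char) : List Int :=
  ((PySem.List.enumerate b 0).filter (fun p => p.2 == c)).map (·.1)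

-- the greedy matching sequence both programs compute
def pvGhost (b : List Char) : List (Int × Char) → Int → List (Int × Int)
  | [], _ => []
  | p :: rest, cur =>
    match (pvOcc b p.2).find? (fun q => decide (cur ≤ q)) with
    | none => pvGhost b rest cur
    | some q => (p.1, q) :: pvGhost b rest q

-- the cost accumulation over that sequence; state = (r, t3, t4)
def pvCost : List (Int × Int) → Int × Int × Int → Int × Int × Int
  | [], st => st
  | p :: rest, st => pvCost rest (st.1 + max (p.1 - 1 - st.2.1) (p.2 - st.2.2 - 1), p.1, p.2)

lemma pvOcc_mem (b : List Char) (c : Char) (q : Int) :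
    q ∈ pvOcc b c ↔ ∃ (k : Nat) (h : k < b.length), q = (k : Int) ∧ b[k] = c := by
  unfold pvOcc
  simp only [List.mem_map, List.mem_filter, PySem.List.mem_enumerate_iff]
  constructor
  · rintro ⟨p, ⟨⟨k, hk, rfl⟩, hc⟩, rfl⟩
    exact ⟨k, hk, by simp, by simpa using hc⟩
  · rintro ⟨k, hk, rfl, hc⟩
    exact ⟨((k : Int), c), ⟨⟨k, hk, by simp [hc]⟩, by simp⟩, rfl⟩

lemma pv_find?_min (l : List Int) (x q : Int) (hl : l.Pairwise (· < ·))
    (h : l.find? (fun y => decide (x ≤ y)) = some q) : ∀ y ∈ l, x ≤ y → q ≤ y := by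
  induction l with
  | nil => simp at h
  | cons a t ih =>
    rw [List.find?_cons] at h
    by_cases hxa : x ≤ a
    · simp [hxa] at h
      subst h
      intro y hy _
      rcases List.mem_cons.mp hy with rfl | hyt
      · exact le_refl _
      · exact le_of_lt ((List.pairwise_cons.mp hl).1 y hyt)
    · simp [hxa] at h
      intro y hy hxy
      rcases List.mem_cons.mp hy with rfl | hyt
      · exact absurd hxy hxa
      · exact ih (List.pairwise_cons.mp hl).2 h y hyt hxy

lemma pv_mem_drop (b : List Char) (c : Char) (k : Nat) :
    c ∈ b.drop k ↔ ∃ (i : Nat), k ≤ i ∧ ∃ (h : i < b.length), b[i] = c := by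
  rw [List.mem_iff_getElem]
  constructor
  · rintro ⟨j, hj, hc⟩
    rw [List.getElem_drop] at hc
    refine ⟨k + j, by omega, by simp at hj; omega, hc⟩
  · rintro ⟨i, hki, hi, hc⟩
    refine ⟨i - k, by simp; omega, ?_⟩
    rw [List.getElem_drop]
    have : k + (i - k) = i := by omega
    simp [this, hc]

lemma pv_singleton_prefix_iff (c : Char) (l : List Char) : [c] <+: l ↔ l.head? = some c := by
  cases l with
  | nil => simp
  | cons a t => simp [List.cons_prefix_cons, eq_comm]

lemma pv_singleton_infix_iff (c : Char) (l : List Char) : [c] <:+: l ↔ c ∈ l := by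
  constructor
  · intro h; exact h.mem (List.mem_singleton_self c)
  · intro h
    obtain ⟨s, t, rfl⟩ := List.append_of_mem h
    exact ⟨s, t, by simp⟩

lemma pvOcc_pairwise (b : List Char) (c : Char) : (pvOcc b c).Pairwise (· < ·) := by
  unfold pvOcc
  exact List.Pairwise.map (fun p : Int × Char => p.1) (fun a b h => h)
    ((PySem.List.pairwise_lt_enumerate b 0).sublist List.filter_sublist)

lemma pv_findFrom_occ (b : List Char) (c : Char) (cur : Int) (h0 : 0 ≤ cur)
    (hle : cur ≤ (b.length : Int)) :
    PySem.Chars.findFrom b [c] cur =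
      (match (pvOcc b c).find? (fun q => decide (cur ≤ q)) with
       | none => -1
       | some q => q) := by
  have hk : cur = ((cur.toNat : Nat) : Int) := by omega
  have hkle : cur.toNat ≤ b.length := by omega
  rcases hf : (pvOcc b c).find? (fun q => decide (cur ≤ q)) with _ | q
  · rw [List.find?_eq_none] at hf
    rw [hk]
    rw [PySem.Chars.findFrom_natCast_eq_neg_one_iff b [c] cur.toNat hkle]
    rw [pv_singleton_infix_iff, pv_mem_drop]
    rintro ⟨i, hki, hi, hc⟩
    have : ((i : Nat) : Int) ∈ pvOcc b c := (pvOcc_mem b c _).mpr ⟨i, hi, rfl, hc⟩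
    have := hf _ this
    simp at this
    omega
  · have hqmem := List.mem_of_find?_eq_some hf
    have hcurq : cur ≤ q := by have := List.find?_some hf; simpa using this
    obtain ⟨kq, hkq, rfl, hbc⟩ := (pvOcc_mem b c q).mp hqmem
    have hinf : [c] <:+: b.drop cur.toNat := by
      rw [pv_singleton_infix_iff, pv_mem_drop]
      exact ⟨kq, by omega, hkq, hbc⟩
    have hne : PySem.Chars.findFrom b [c] cur ≠ -1 := by
      rw [hk]
      rw [ne_eq, PySem.Chars.findFrom_natCast_eq_neg_one_iff b [c] cur.toNat hkle]
      simpa using hinf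
    have hspec := PySem.Chars.findFrom_natCast_spec b [c] cur.toNat hkle (by rw [← hk]; exact hne)
    rw [← hk] at hspec
    obtain ⟨hge, hpre, hmin⟩ := hspec
    set F := PySem.Chars.findFrom b [c] cur with hF
    have hF0 : 0 ≤ F := le_trans h0 hge
    have hpre' : b[F.toNat]? = some c := by
      rw [pv_singleton_prefix_iff, List.head?_drop] at hpre
      exact hpre
    have hFlen : F.toNat < b.length := by
      by_contra hcon
      rw [List.getElem?_eq_none_iff.mpr (by omega)] at hpre'
      simp at hpre'
    have hFc : b[F.toNat] = c := by
      rw [List.getElem?_eq_getElem hFlen] at hpre'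
      simpa using hpre'
    have h1 : F.toNat ≤ kq := by
      by_contra hcon
      apply hmin kq (by omega) (by omega)
      rw [pv_singleton_prefix_iff, List.head?_drop, List.getElem?_eq_getElem hkq]
      simp [hbc]
    have hFocc : ((F.toNat : Nat) : Int) ∈ pvOcc b c := (pvOcc_mem b c _).mpr ⟨F.toNat, hFlen, rfl, hFc⟩
    have h2 : (kq : Int) ≤ (F.toNat : Int) := by
      exact pv_find?_min _ cur _ (pvOcc_pairwise b c) hf _ hFocc (by omega)
    simp only []
    omega

lemma pv_max?_append (vs : List Int) (q : Int) (h : ∀ y ∈ vs, y ≤ q) :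
    PySem.List.max? (vs ++ [q]) (fun v => v) = some q := by
  rcases hm : PySem.List.max? (vs ++ [q]) (fun v => v) with _ | m
  · simp [PySem.List.max?_eq_none_iff] at hm
  · have hmem := PySem.List.max?_mem hm
    have hmax := PySem.List.max?_isMax hm
    have h1 : m ≤ q := by
      rcases List.mem_append.mp hmem with hv | hv
      · exact h m hv
      · simp at hv; omega
    have h2 : q ≤ m := by simpa using hmax q (by simp)
    congr 1; omega

lemma pv_min?_cons (a : Int) (t : List Int) (h : ∀ y ∈ t, a ≤ y) :
    PySem.List.min? (a :: t) (fun k => k) = some a := by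
  rcases hm : PySem.List.min? (a :: t) (fun k => k) with _ | m
  · simp [PySem.List.min?_eq_none_iff] at hm
  · have hmem := PySem.List.min?_mem hm
    have hmin := PySem.List.min?_isMin hm
    have h1 : a ≤ m := by
      rcases List.mem_cons.mp hmem with rfl | hv
      · exact le_refl _
      · exact h m hv
    have h2 : m ≤ a := by simpa using hmin a (by simp)
    congr 1; omega

lemma pvOcc_nil_of_not_mem (b : List Char) (c : Char) (hc : c ∉ b) : pvOcc b c = [] := by
  rcases ho : pvOcc b c with _ | ⟨q, t⟩
  · rfl
  · exfalso
    have : q ∈ pvOcc b c := by rw [ho]; exact List.mem_cons_self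
    obtain ⟨k, hk, _, hbc⟩ := (pvOcc_mem b c q).mp this
    exact hc (hbc ▸ List.getElem_mem hk)

lemma pvOcc_bounds (b : List Char) (c : Char) (q : Int) (hq : q ∈ pvOcc b c) :
    0 ≤ q ∧ q ≤ (b.length : Int) := by
  obtain ⟨k, hk, rfl, _⟩ := (pvOcc_mem b c q).mp hq
  constructor <;> [positivity; exact_mod_cast le_of_lt hk]

-- generalised occurrence list of an enumerate fragment
def pvOccP (ps : List (Int × Char)) (c : Char) : List Int :=
  (ps.filter (fun p => p.2 == c)).map (·.1)

lemma pvOccP_enumerate_zero (b : List Char) (c : Char) :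
    pvOccP (PySem.List.enumerate b 0) c = pvOcc b c := rfl

lemma pvOccP_lb (b : List Char) (j0 : Int) (c : Char) :
    ∀ y ∈ pvOccP (PySem.List.enumerate b j0) c, j0 ≤ y := by
  intro y hy
  unfold pvOccP at hy
  simp only [List.mem_map, List.mem_filter, PySem.List.mem_enumerate_iff] at hy
  obtain ⟨p, ⟨⟨k, hk, rfl⟩, _⟩, rfl⟩ := hy
  simp

lemma pv_find?_weaken (l : List Int) (x : Int) (h : ∀ y ∈ l, x + 1 ≤ y) :
    l.find? (fun q => decide (x ≤ q)) = l.find? (fun q => decide (x + 1 ≤ q)) := by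
  cases l with
  | nil => rfl
  | cons a t =>
    have ha := h a (List.mem_cons_self)
    rw [List.find?_cons, List.find?_cons]
    have h1 : decide (x ≤ a) = true := by simp; omega
    have h2 : decide (x + 1 ≤ a) = true := by simpa using ha
    rw [h1, h2]

-- length of the next-occurrence table
lemma pvNxtAux_length (ps : List (Int × Char)) :
    (ps.foldr pvNxtStep [PySem.Dict.empty]).length = ps.length + 1 := by
  induction ps with
  | nil => rfl
  | cons p t ih => simp only [List.foldr_cons, pvNxtStep, List.length_cons, ih]

-- automaton correctness: entry k of the table looks up the first occurrence ≥ j0 + k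
lemma pv_find?_shift (l : List Int) (a b : Int) (h : a = b) :
    l.find? (fun q => decide (a ≤ q)) = l.find? (fun q => decide (b ≤ q)) := by rw [h]

lemma pvNxtAux_get (b : List Char) : ∀ (j0 : Int) (k : Nat) (c : Char), k ≤ b.length →
    (((PySem.List.enumerate b j0).foldr pvNxtStep [PySem.Dict.empty]).getD k PySem.Dict.empty).get? c
      = (pvOccP (PySem.List.enumerate b j0) c).find? (fun q => decide (j0 + (k : Int) ≤ q)) := by
  induction b with
  | nil =>
    intro j0 k c hk
    have hk0 : k = 0 := Nat.le_zero.mp (by simpa using hk)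
    subst hk0
    rfl
  | cons x rest ih =>
    intro j0 k c hk
    rw [PySem.List.enumerate_cons, List.foldr_cons]
    have hT : ∃ d ts, (PySem.List.enumerate rest (j0 + 1)).foldr pvNxtStep [PySem.Dict.empty]
        = d :: ts := by
      rcases hE : (PySem.List.enumerate rest (j0 + 1)).foldr pvNxtStep [PySem.Dict.empty] with _ | ⟨d, ts⟩
      · exfalso
        have := pvNxtAux_length (PySem.List.enumerate rest (j0 + 1))
        rw [hE] at this
        simp at this
      · exact ⟨d, ts, rfl⟩
    obtain ⟨d, ts, hT⟩ := hT
    have hocc : pvOccP ((j0, x) :: PySem.List.enumerate rest (j0 + 1)) c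
        = (if x == c then [j0] else []) ++ pvOccP (PySem.List.enumerate rest (j0 + 1)) c := by
      unfold pvOccP
      rw [List.filter_cons]
      by_cases hxc : x = c
      · simp [hxc]
      · have : ((j0, x).2 == c) = false := by simpa using hxc
        simp [this]
    cases k with
    | zero =>
      have hd : d = ((PySem.List.enumerate rest (j0 + 1)).foldr pvNxtStep [PySem.Dict.empty]).getD 0 PySem.Dict.empty := by
        rw [hT]; rfl
      rw [hT]
      simp only [pvNxtStep, List.getD_cons_zero]
      rw [hocc]
      by_cases hxc : x = c
      · subst hxc
        simp only [beq_self_eq_true, if_true, List.singleton_append, List.find?_cons]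
        have hpred : decide (j0 + ((0 : Nat) : Int) ≤ j0) = true := by simp
        rw [hpred]
        exact PySem.Dict.get?_insert_self _ _ _
      · have hbeq : (x == c) = false := by simpa using hxc
        rw [hbeq]
        simp only [Bool.false_eq_true, if_false, List.nil_append]
        rw [PySem.Dict.get?_insert_of_ne _ _ (fun h => hxc h.symm), hd,
          ih (j0 + 1) 0 c (by omega)]
        rw [pv_find?_shift _ (j0 + 1 + ((0 : Nat) : Int)) (j0 + ((0 : Nat) : Int) + 1) (by push_cast; ring)]
        exact (pv_find?_weaken (pvOccP (PySem.List.enumerate rest (j0 + 1)) c) (j0 + ((0 : Nat) : Int))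
          (by intro y hy; have := pvOccP_lb rest (j0 + 1) c y hy; push_cast; omega)).symm
    | succ k' =>
      rw [hT]
      simp only [pvNxtStep, List.getD_cons_succ]
      rw [← hT, ih (j0 + 1) k' c (by simpa using hk)]
      rw [hocc]
      by_cases hxc : x = c
      · have hbeq : (x == c) = true := by simp [hxc]
        rw [hbeq]
        simp only [if_true, List.singleton_append, List.find?_cons]
        have hpred : decide (j0 + ((k' + 1 : Nat) : Int) ≤ j0) = false := by
          simp only [decide_eq_false_iff_not]
          push_cast
          omega
        rw [hpred]
        exact pv_find?_shift _ _ _ (by push_cast; ring)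
      · have hbeq : (x == c) = false := by simpa using hxc
        rw [hbeq]
        simp only [Bool.false_eq_true, if_false, List.nil_append]
        exact pv_find?_shift _ _ _ (by push_cast; ring)

-- the table lookup is the greedy next-occurrence search
lemma pv_table_get (b : List Char) (cur : Int) (c : Char) (h0 : 0 ≤ cur)
    (hle : cur ≤ (b.length : Int)) :
    (PySem.List.pyGetD (pvNxtTable b) cur PySem.Dict.empty).get? c
      = (pvOcc b c).find? (fun q => decide (cur ≤ q)) := by
  have hk : cur = ((cur.toNat : Nat) : Int) := by omega
  rw [hk, PySem.List.pyGetD_natCast]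
  unfold pvNxtTable
  rw [pvNxtAux_get b 0 cur.toNat c (by omega), pvOccP_enumerate_zero]
  exact pv_find?_shift _ _ _ (by omega)

-- B's fused pass computes the cost of the ghost matching
lemma pv_bfold (l2 : List Char) (cs : List Char) : ∀ (j0 cur r pk pv : Int),
    0 ≤ cur → cur ≤ (l2.length : Int) →
    ((PySem.List.enumerate cs j0).foldl (pvBStep (pvNxtTable l2)) (cur, r, pk, pv)).2
      = pvCost (pvGhost l2 (PySem.List.enumerate cs j0) cur) (r, pk, pv) := by
  induction cs with
  | nil =>
    intro j0 cur r pk pv _ _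
    simp [PySem.List.enumerate_nil, pvGhost, pvCost]
  | cons c cs ih =>
    intro j0 cur r pk pv h0 hle
    rw [PySem.List.enumerate_cons, List.foldl_cons]
    rw [show pvGhost l2 ((j0, c) :: PySem.List.enumerate cs (j0+1)) cur
        = (match (pvOcc l2 c).find? (fun q => decide (cur ≤ q)) with
           | none => pvGhost l2 (PySem.List.enumerate cs (j0+1)) cur
           | some q => (j0, q) :: pvGhost l2 (PySem.List.enumerate cs (j0+1)) q) from rfl]
    have hstep : pvBStep (pvNxtTable l2) (cur, r, pk, pv) (j0, c)
        = match (PySem.List.pyGetD (pvNxtTable l2) cur PySem.Dict.empty).get? c with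
          | none => (cur, r, pk, pv)
          | some q => (q, r + max (j0 - 1 - pk) (q - pv - 1), j0, q) := rfl
    rw [hstep, pv_table_get l2 cur c h0 hle]
    rcases hf : (pvOcc l2 c).find? (fun q => decide (cur ≤ q)) with _ | q
    · exact ih (j0+1) cur r pk pv h0 hle
    · obtain ⟨hq0, hqle⟩ := pvOcc_bounds l2 c q (List.mem_of_find?_eq_some hf)
      rw [ih (j0+1) q _ _ _ hq0 hqle]
      rfl

-- A's compare builds exactly the ghost matching as a dict (invariant over the fold)
lemma pv_compareA (l2 cs : List Char) (i : Int) : ∀ (j0 cur : Int) (d : PySem.Dict Int Int),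
    0 ≤ cur → cur ≤ (l2.length : Int) →
    (d.items.isEmpty = true → cur = 0) →
    (d.items.isEmpty = false → PySem.List.max? d.values (fun v => v) = some cur) →
    (∀ p ∈ d.items, p.1 < i + j0) →
    ((PySem.List.enumerate cs j0).foldl (fun td (p : Int × Char) =>
        if PySem.Chars.isIn [p.2] l2 then
          let start : Int := if td.items.isEmpty then 0 else (PySem.List.max? td.values (fun v => v)).getD 0
          let f := PySem.Chars.findFrom l2 [p.2] start
          if f = -1 then td else td.insert (i + p.1) f
        else td) d).items
      = d.items ++ pvGhost l2 (PySem.List.enumerate cs (i + j0)) cur := by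
  induction cs with
  | nil =>
    intro j0 cur d _ _ _ _ _
    simp [PySem.List.enumerate_nil, pvGhost]
  | cons c cs ih =>
    intro j0 cur d h0 hle hemp hne hkeys
    rw [PySem.List.enumerate_cons, PySem.List.enumerate_cons, List.foldl_cons]
    rw [show pvGhost l2 ((i + j0, c) :: PySem.List.enumerate cs (i + j0 + 1)) cur
        = (match (pvOcc l2 c).find? (fun q => decide (cur ≤ q)) with
           | none => pvGhost l2 (PySem.List.enumerate cs (i + j0 + 1)) cur
           | some q => (i + j0, q) :: pvGhost l2 (PySem.List.enumerate cs (i + j0 + 1)) q) from rfl]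
    have hstart : (if d.items.isEmpty then 0 else (PySem.List.max? d.values (fun v => v)).getD 0) = cur := by
      rcases hi : d.items.isEmpty with _ | _
      · rw [hne hi]; rfl
      · simp [hemp hi]
    by_cases hc : c ∈ l2
    · have hisin : PySem.Chars.isIn [c] l2 = true := by
        rw [PySem.Chars.isIn_iff_infix, pv_singleton_infix_iff]; exact hc
      have hff := pv_findFrom_occ l2 c cur h0 hle
      rcases hf : (pvOcc l2 c).find? (fun q => decide (cur ≤ q)) with _ | q
      · rw [hf] at hff
        simp only [hisin, if_true, hstart, hff]
        have := ih (j0+1) cur d h0 hle hemp hne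
          (fun p hp => by have := hkeys p hp; omega)
        rw [show i + (j0 + 1) = i + j0 + 1 by ring] at this
        exact this
      · rw [hf] at hff
        obtain ⟨hq0, hqle⟩ := pvOcc_bounds l2 c q (List.mem_of_find?_eq_some hf)
        have hqne : ¬ (q = -1) := by omega
        simp only [hisin, if_true, hstart, hff, if_neg hqne]
        have hnc : d.contains (i + j0) = false := by
          rcases hcont : d.contains (i + j0) with _ | _
          · rfl
          · exfalso
            rw [PySem.Dict.contains_iff_mem_keys] at hcont
            obtain ⟨p, hp, hpe⟩ := List.mem_map.mp hcont
            have := hkeys p hp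
            omega
        have hitems : (d.insert (i + j0) q).items = d.items ++ [(i + j0, q)] :=
          PySem.Dict.items_insert_of_not_contains d _ hnc
        have hvals : (d.insert (i + j0) q).values = d.values ++ [q] := by
          show (d.insert (i + j0) q).items.map (·.2) = _
          rw [hitems, List.map_append]
          rfl
        have hmax : PySem.List.max? (d.insert (i + j0) q).values (fun v => v) = some q := by
          rw [hvals]
          apply pv_max?_append
          intro y hy
          rcases hi : d.items.isEmpty with _ | _
          · have hcq : cur ≤ q := by have := List.find?_some hf; simpa using this
            have hyc : y ≤ cur := by simpa using PySem.List.max?_isMax (hne hi) y hy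
            omega
          · exfalso
            have : d.values = [] := by
              show d.items.map (·.2) = []
              simp [List.isEmpty_iff.mp hi]
            rw [this] at hy
            simp at hy
        have := ih (j0+1) q (d.insert (i + j0) q) hq0 hqle
          (fun hi => by rw [hitems] at hi; simp at hi)
          (fun _ => hmax)
          (fun p hp => by
            rw [hitems] at hp
            rcases List.mem_append.mp hp with hp | hp
            · have := hkeys p hp; omega
            · have hp1 : p.1 = i + j0 := by
                have : p = (i + j0, q) := by simpa using hp
                rw [this]
              omega)
        rw [show i + (j0 + 1) = i + j0 + 1 by ring] at this
        rw [this, hitems]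
        simp
    · have hisin : PySem.Chars.isIn [c] l2 = false := by
        rw [PySem.Chars.isIn_eq_false_iff]
        rw [pv_singleton_infix_iff]
        exact hc
      simp only [hisin, Bool.false_eq_true, if_false]
      rw [pvOcc_nil_of_not_mem l2 c hc]
      simp only [List.find?_nil]
      have := ih (j0+1) cur d h0 hle hemp hne (fun p hp => by have := hkeys p hp; omega)
      rw [show i + (j0 + 1) = i + j0 + 1 by ring] at this
      exact this

lemma pv_compare_items (l2 cs : List Char) (i : Int) :
    (pvCompare cs l2 i).items = pvGhost l2 (PySem.List.enumerate cs i) 0 := by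
  have h := pv_compareA l2 cs i 0 0 PySem.Dict.empty (le_refl 0) (by positivity)
    (fun _ => rfl) (fun hne => by simp [PySem.Dict.empty] at hne) (fun p hp => by simp [PySem.Dict.empty] at hp)
  rw [PySem.List.enumerate_eq_map_pyRange cs ' ', List.foldl_map, add_zero,
    show (PySem.Dict.empty : PySem.Dict Int Int).items = [] from rfl, List.nil_append] at h
  unfold pvCompare
  exact h

lemma pv_ghost_keys_sublist (l2 : List Char) (ps : List (Int × Char)) : ∀ (cur : Int),
    ((pvGhost l2 ps cur).map (·.1)).Sublist (ps.map (·.1)) := by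
  induction ps with
  | nil => intro cur; simp [pvGhost]
  | cons p rest ih =>
    intro cur
    rw [show pvGhost l2 (p :: rest) cur
        = (match (pvOcc l2 p.2).find? (fun q => decide (cur ≤ q)) with
           | none => pvGhost l2 rest cur
           | some q => (p.1, q) :: pvGhost l2 rest q) from rfl]
    rcases (pvOcc l2 p.2).find? (fun q => decide (cur ≤ q)) with _ | q
    · exact (ih cur).cons p.1
    · exact (ih q).cons₂ p.1

lemma pv_calcLoop_eq (pairs : List (Int × Int)) : ∀ (r t3 t4 : Int),
    ((pairs.map (·.1)).Pairwise (· < ·)) →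
    pvCalcLoop pairs.length (PySem.Dict.mk pairs) r t3 t4 = pvCost pairs (r, t3, t4) := by
  induction pairs with
  | nil =>
    intro r t3 t4 _
    simp [pvCalcLoop, pvCost]
  | cons p rest ih =>
    intro r t3 t4 hp
    rw [List.map_cons, List.pairwise_cons] at hp
    obtain ⟨hlt, hrest⟩ := hp
    have hkeys : (PySem.Dict.mk (p :: rest)).keys = p.1 :: rest.map (·.1) := rfl
    have hmin : PySem.List.min? ((PySem.Dict.mk (p :: rest)).keys) (fun k => k) = some p.1 := by
      rw [hkeys]
      exact pv_min?_cons _ _ (fun y hy => by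
        obtain ⟨q, hq, rfl⟩ := List.mem_map.mp hy
        exact le_of_lt (hlt _ (List.mem_map_of_mem hq)))
    have hget : (PySem.Dict.mk (p :: rest)).getD p.1 0 = p.2 := by
      rw [PySem.Dict.getD_eq_get?_getD, PySem.Dict.get?_mk_cons]
      simp
    have herase : (PySem.Dict.mk (p :: rest)).erase p.1 = PySem.Dict.mk rest := by
      show PySem.Dict.mk (((p :: rest)).filter (fun q => !q.1 == p.1)) = _
      congr 1
      simp only [List.filter_cons, beq_self_eq_true, Bool.not_true, Bool.false_eq_true, if_false]
      exact List.filter_eq_self.mpr (fun q hq => by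
        have := hlt _ (List.mem_map_of_mem hq)
        simp; omega)
    show pvCalcLoop (rest.length + 1) _ r t3 t4 = _
    rw [pvCalcLoop]
    rw [hmin]
    simp only []
    rw [hget, herase]
    rw [ih _ _ _ hrest]
    rfl

-- per-start agreement: A's calculate-of-compare is B's pass
lemma pv_point (l1 l2 : List Char) (i : Int) :
    pvCalculate l1 l2 (pvCompare (PySem.List.slice l1 (some i) none) l2 i)
      = pvPass (pvNxtTable l2) (l1.length : Int) (l2.length : Int) l1 i := by
  set cs := PySem.List.slice l1 (some i) none with hcs
  set pairs := pvGhost l2 (PySem.List.enumerate cs i) 0 with hpairs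
  have hd : pvCompare cs l2 i = PySem.Dict.mk pairs := by
    apply PySem.Dict.ext
    rw [pv_compare_items]
  have hpw : (pairs.map (·.1)).Pairwise (· < ·) := by
    apply List.Pairwise.sublist (pv_ghost_keys_sublist l2 _ 0)
    exact (List.pairwise_map).mpr ((PySem.List.pairwise_lt_enumerate cs i).imp (fun h => h))
  have hb := pv_bfold l2 cs i 0 0 (-1) (-1) (le_refl 0) (by positivity)
  unfold pvCalculate pvPass
  rw [hd]
  rw [show (PySem.Dict.mk pairs).size = pairs.length from rfl]
  rw [pv_calcLoop_eq pairs 0 (-1) (-1) hpw]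
  simp only []
  rw [hb]

-- the running Option-min accumulator computes min? of the value list
lemma pv_optmin_some (t : List Int) : ∀ (r : Int),
    t.foldl (fun res x => some (match res with | none => x | some r => min r x)) (some r)
      = some (t.foldl min r) := by
  induction t with
  | nil => intro r; rfl
  | cons a t ih => intro r; rw [List.foldl_cons, List.foldl_cons]; exact ih (min r a)

lemma pv_optmin (l : List Int) :
    l.foldl (fun res x => some (match res with | none => x | some r => min r x)) none
      = PySem.List.min? l (fun x => x) := by
  cases l with
  | nil => rfl
  | cons a t =>
    rw [List.foldl_cons, pv_optmin_some, PySem.List.min?_id_cons]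

-- A's outer loop as the Option-min fold over the mapped cost list
lemma pv_loopA_eq (l1 l2 : List Char) (init : Option Int) :
    pvLoopA l1 l2 init
      = (pvCosts l1 l2).foldl (fun res x => some (match res with | none => x | some r => min r x)) init := by
  unfold pvLoopA pvCosts
  simp only []
  rw [List.foldl_map]
  apply PySem.List.foldl_congr_mem
  intro acc x hx
  rcases acc with _ | r <;> simp only [] <;> rw [pv_point]

-- ===== VERDICT (by name: the statement is the Claim_ definition above) =====
theorem steps_to_convert_spec : Claim_equal_steps_to_convert := by
  intro line1 line2 _
  unfold Spec_steps_to_convert steps_to_convert steps_to_convert_alt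
  rw [pv_loopA_eq, pv_loopA_eq, ← List.foldl_append, pv_optmin]
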